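-- pv_equiv track=rewrite | github.com/geekatron/jerry | projects/PROJ-001-plugin-cleanup/tests/e2e/test_document_traceability.py | traverse_from_document
-- ===== SOURCE A (Python) =====
-- from typing import Set
--
-- def traverse_from_document(
--     start: str,
--     graph: dict[str, set[str]],
--     visited: Set[str] | None = None
-- ) -> set[str]:
--     """
--     Traverse the document graph from a starting point.
--
--     Returns all reachable documents.
--     """
--     if visited is None:
--         visited = set()
--
--     if start in visited:
--         return visited
--
--     visited.add(start)
--
--     for ref in graph.get(start, set()):
--         traverse_from_document(ref, graph, visited)
--
--     return visited
-- ===== SOURCE B (Python) =====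
-- def traverse_from_document(
--     start: str,
--     graph: dict[str, set[str]],
--     visited=None
-- ) -> set[str]:
--     """
--     Traverse the document graph from a starting point, as an explicit
--     state machine: the state is the worklist; one step pops the front
--     node and, if new, marks it and prepends its references.
--
--     Returns all reachable documents (mutates and returns the given visited set).
--     """
--     if visited is None:
--         visited = set()
--
--     state = [start]
--     while state:
--         node, state = state[0], state[1:]
--         if node not in visited:
--             visited.add(node)
--             state = list(graph.get(node, set())) + state
--     return visited
-- ===== Notes on version B (the rewrite author's own statement) =====
-- stated objective: alternative
-- what changed: A's recursive DFS is replaced by an explicit state machine: a single pure transition (pop the front worklist node; if unvisited, mark it and prepend its references) iterated until the worklist empties, mutating and returning the same visited set.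
import Mathlib
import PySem

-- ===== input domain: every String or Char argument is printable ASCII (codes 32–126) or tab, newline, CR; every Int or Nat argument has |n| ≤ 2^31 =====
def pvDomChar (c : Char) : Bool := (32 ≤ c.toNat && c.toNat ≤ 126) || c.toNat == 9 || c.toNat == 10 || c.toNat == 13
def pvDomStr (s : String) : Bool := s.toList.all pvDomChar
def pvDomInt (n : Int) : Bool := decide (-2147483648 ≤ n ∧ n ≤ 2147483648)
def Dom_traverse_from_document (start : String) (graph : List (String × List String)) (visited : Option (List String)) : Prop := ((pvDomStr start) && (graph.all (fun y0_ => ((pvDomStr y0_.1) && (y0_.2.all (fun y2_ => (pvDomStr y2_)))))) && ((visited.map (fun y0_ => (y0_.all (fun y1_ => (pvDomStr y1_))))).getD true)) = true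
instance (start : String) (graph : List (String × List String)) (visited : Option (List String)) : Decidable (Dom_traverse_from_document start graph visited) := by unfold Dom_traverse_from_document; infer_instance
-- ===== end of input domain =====

-- B replaces A's recursive DFS by an explicit state machine: one pure transition on the worklist
-- (pop the front node; if unvisited, mark it and prepend its references), iterated to a fixpoint;
-- objective: alternative. Both A and B mutate the `visited` argument in place; the equivalence
-- proved here is about the return value.

-- ===== PORT A =====
-- graph.get(k, set()) (shared by both ports; first-match association-list lookup)
def pvRefs (graph : List (String × List String)) (k : String) : List String :=
  PySem.Dict.getD (PySem.Dict.mk graph) k []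

-- all reference lists concatenated (used only to compute a sufficient fuel/step bound)
def pvAllRefs (graph : List (String × List String)) : List String :=
  graph.flatMap (fun p => p.2)

-- A's recursion; the Nat fuel is a totalization guard only (the wrapper passes a provably
-- sufficient amount, so the fuel-0 branch is never reached on any input)
def pvDfsA (graph : List (String × List String)) : Nat → String → List String → List String
  | 0, _, visited => visited
  | fuel+1, start, visited =>
    if PySem.Set.contains visited start then visited
    else (pvRefs graph start).foldl (fun v r => pvDfsA graph fuel r v) (PySem.Set.add visited start)

def traverse_from_document (start : String) (graph : List (String × List String)) (visited : Option (List String)) : List String :=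
  pvDfsA graph ((start :: pvAllRefs graph).length + 1) start (visited.getD [])

-- ===== PORT B =====
-- one transition of B's while-loop: pop the front node of the worklist; skip it if already
-- visited, otherwise mark it and prepend its references (the empty state is a fixpoint)
def pvStepB (graph : List (String × List String)) :
    List String × List String → List String × List String
  | ([], visited) => ([], visited)
  | (node :: rest, visited) =>
    if PySem.Set.contains visited node then (rest, visited)
    else (pvRefs graph node ++ rest, PySem.Set.add visited node)

-- the step count is a totalization guard: it provably exceeds the number of loop iterations,
-- and iterating past the empty worklist is a no-op
def traverse_from_document_alt (start : String) (graph : List (String × List String)) (visited : Option (List String)) : List String :=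
  ((pvStepB graph)^[((start :: pvAllRefs graph).length + 1) * ((pvAllRefs graph).length + 1) + 1]
      ([start], visited.getD [])).2

-- ===== PRECONDITION & SPEC =====
def Spec_traverse_from_document (start : String) (graph : List (String × List String)) (visited : Option (List String)) (out : List String) : Prop := out = traverse_from_document_alt start graph visited
instance (start : String) (graph : List (String × List String)) (visited : Option (List String)) (out : List String) : Decidable (Spec_traverse_from_document start graph visited out) := by unfold Spec_traverse_from_document; infer_instance

-- ===== CLAIM (what is proved, stated in full; the proofs are below) =====
def Claim_equal_traverse_from_document : Prop := ∀ (start : String) (graph : List (String × List String)) (visited : Option (List String)), Dom_traverse_from_document start graph visited → Spec_traverse_from_document start graph visited (traverse_from_document start graph visited)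

-- ===== LEMMAS AND PROOFS =====

-- proof-side view of B's iteration as a fueled worklist recursion
def pvLoopB (graph : List (String × List String)) : Nat → List String → List String → List String
  | 0, _, visited => visited
  | _+1, [], visited => visited
  | fuel+1, node :: rest, visited =>
    if PySem.Set.contains visited node then pvLoopB graph fuel rest visited
    else pvLoopB graph fuel (pvRefs graph node ++ rest) (PySem.Set.add visited node)

lemma pvIter_eq_loop (graph : List (String × List String)) :
    ∀ (g : Nat) (stack v : List String),
      ((pvStepB graph)^[g] (stack, v)).2 = pvLoopB graph g stack v := by
  intro g
  induction g with
  | zero => intro stack v; rfl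
  | succ g ih =>
    intro stack v
    rw [Function.iterate_succ_apply]
    match stack with
    | [] =>
      rw [show pvStepB graph ([], v) = ([], v) from rfl, ih]
      cases g <;> rfl
    | node :: rest =>
      by_cases h : PySem.Set.contains v node = true
      · rw [show pvStepB graph (node :: rest, v) = (rest, v) from by
          simp only [pvStepB]; rw [if_pos h], ih]
        simp only [pvLoopB]; rw [if_pos h]
      · have h' : ¬ PySem.Set.contains v node = true := h
        rw [show pvStepB graph (node :: rest, v)
            = (pvRefs graph node ++ rest, PySem.Set.add v node) from by
          simp only [pvStepB]; rw [if_neg h'], ih]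
        simp only [pvLoopB]; rw [if_neg h']

-- the universe of nodes any call can ever add beyond the initial visited set
def pvU (start : String) (graph : List (String × List String)) : List String :=
  start :: pvAllRefs graph

-- number of universe entries not yet visited (the termination measure)
def pvMu (start : String) (graph : List (String × List String)) (v : List String) : Nat :=
  ((pvU start graph).filter (fun a => !(v.contains a))).length

lemma pvRefs_sublist (graph : List (String × List String)) (k : String) :
    (pvRefs graph k).Sublist (pvAllRefs graph) := by
  induction graph with
  | nil => simp [pvRefs, pvAllRefs, PySem.Dict.getD, PySem.Dict.get?]
  | cons p rest ih =>
    simp only [pvRefs, pvAllRefs] at *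
    rw [List.flatMap_cons]
    rw [PySem.Dict.getD] at *
    rw [PySem.Dict.get?_mk_cons]
    split
    · simp
    · exact ih.trans (List.sublist_append_right _ _)

lemma pvAdd_eq (v : List String) (s : String) (h : PySem.Set.contains v s = false) :
    PySem.Set.add v s = v ++ [s] := by
  simp [PySem.Set.add, PySem.Set.contains] at *; simp [h]

lemma pvMu_mono (start0 : String) (graph : List (String × List String)) (v w : List String)
    (h : ∀ a, a ∈ v → a ∈ w) : pvMu start0 graph w ≤ pvMu start0 graph v := by
  apply List.Sublist.length_le
  apply List.monotone_filter_right
  intro a ha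
  simp only [Bool.not_eq_eq_eq_not, Bool.not_true, List.contains_eq_mem,
    decide_eq_false_iff_not] at *
  exact fun hv => ha (h a hv)

lemma pvMu_lt (start0 : String) (graph : List (String × List String)) (v : List String) (s : String)
    (hs : s ∈ pvU start0 graph) (hv : PySem.Set.contains v s = false) :
    pvMu start0 graph (v ++ [s]) < pvMu start0 graph v := by
  have hsv : s ∉ v := by simpa [PySem.Set.contains, List.contains_eq_mem] using hv
  unfold pvMu
  have heq : ((pvU start0 graph).filter (fun a => !((v ++ [s]).contains a)))
      = ((pvU start0 graph).filter (fun a => !(v.contains a))).filter (fun a => !(a == s)) := by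
    rw [List.filter_filter]
    apply List.filter_congr
    intro a _
    simp only [List.contains_eq_mem, List.mem_append, List.mem_singleton]
    by_cases h1 : a = s <;> by_cases h2 : a ∈ v <;> simp [h1, h2]
  rw [heq]
  rw [List.length_filter_lt_length_iff_exists]
  refine ⟨s, ?_, by simp⟩
  simp [List.mem_filter, hs, List.contains_eq_mem, hsv]

lemma pvMu_le (start0 : String) (graph : List (String × List String)) (v : List String) :
    pvMu start0 graph v ≤ (pvU start0 graph).length := List.length_filter_le _ _

lemma pvDfsA_prefix (graph : List (String × List String)) :
    ∀ (f : Nat) (s : String) (v : List String), v <+: pvDfsA graph f s v := by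
  intro f
  induction f with
  | zero => intro s v; exact List.prefix_refl _
  | succ f ih =>
    intro s v
    simp only [pvDfsA]
    split
    · exact List.prefix_refl _
    · rename_i h
      rw [pvAdd_eq v s (by simpa using h)]
      have base : (v ++ [s]) <+: (pvRefs graph s).foldl (fun v r => pvDfsA graph f r v) (v ++ [s]) := by
        generalize pvRefs graph s = cs
        generalize v ++ [s] = w
        induction cs generalizing w with
        | nil => exact List.prefix_refl _
        | cons c cs ihc =>
          simp only [List.foldl_cons]
          exact (ih c w).trans (ihc _)
      exact (List.prefix_append v [s]).trans base

lemma pvDfsA_fuel (start0 : String) (graph : List (String × List String)) :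
    ∀ (n : Nat) (s : String) (v : List String) (f g : Nat),
      s ∈ pvU start0 graph → pvMu start0 graph v < n →
      pvMu start0 graph v < f → pvMu start0 graph v < g →
      pvDfsA graph f s v = pvDfsA graph g s v := by
  intro n
  induction n with
  | zero => intro s v f g _ hn; omega
  | succ n ih =>
    intro s v f g hs hn hf hg
    obtain ⟨f, rfl⟩ : ∃ f', f = f' + 1 := ⟨f - 1, by omega⟩
    obtain ⟨g, rfl⟩ : ∃ g', g = g' + 1 := ⟨g - 1, by omega⟩
    simp only [pvDfsA]
    split
    · rfl
    · rename_i hcon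
      have hcon' : PySem.Set.contains v s = false := by simpa using hcon
      rw [pvAdd_eq v s hcon']
      have hmu : pvMu start0 graph (v ++ [s]) < pvMu start0 graph v := pvMu_lt start0 graph v s hs hcon'
      have key : ∀ (cs : List String), (∀ c ∈ cs, c ∈ pvU start0 graph) →
          ∀ (w : List String), pvMu start0 graph w < pvMu start0 graph v →
          cs.foldl (fun v r => pvDfsA graph f r v) w = cs.foldl (fun v r => pvDfsA graph g r v) w := by
        intro cs hcs
        induction cs with
        | nil => intro w _; rfl
        | cons c cs ihc =>
          intro w hw
          simp only [List.foldl_cons]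
          rw [ih c w f g (hcs c (by simp)) (by omega) (by omega) (by omega)]
          refine ihc (fun c hc => hcs c (by simp [hc])) _ ?_
          have hsub : ∀ a, a ∈ w → a ∈ pvDfsA graph g c w :=
            fun a ha => (pvDfsA_prefix graph g c w).subset ha
          exact lt_of_le_of_lt (pvMu_mono start0 graph w _ hsub) hw
      refine key (pvRefs graph s) ?_ (v ++ [s]) hmu
      intro c hc
      exact List.mem_cons_of_mem _ ((pvRefs_sublist graph s).subset hc)

lemma pvFoldl_fuel (start0 : String) (graph : List (String × List String)) :
    ∀ (cs : List String) (w : List String) (f g : Nat),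
      (∀ c ∈ cs, c ∈ pvU start0 graph) → pvMu start0 graph w < f → pvMu start0 graph w < g →
      cs.foldl (fun v r => pvDfsA graph f r v) w = cs.foldl (fun v r => pvDfsA graph g r v) w := by
  intro cs
  induction cs with
  | nil => intro w f g _ _ _; rfl
  | cons c cs ihc =>
    intro w f g hcs hf hg
    simp only [List.foldl_cons]
    rw [pvDfsA_fuel start0 graph (pvMu start0 graph w + 1) c w f g (hcs c (by simp))
      (by omega) hf hg]
    have hsub : ∀ a, a ∈ w → a ∈ pvDfsA graph g c w :=
      fun a ha => (pvDfsA_prefix graph g c w).subset ha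
    have hmu := pvMu_mono start0 graph w _ hsub
    exact ihc _ f g (fun c hc => hcs c (by simp [hc])) (by omega) (by omega)

lemma pvBridge (start0 : String) (graph : List (String × List String)) (f : Nat) :
    ∀ (g : Nat) (stack v : List String),
      (∀ x ∈ stack, x ∈ pvU start0 graph) →
      pvMu start0 graph v < f →
      stack.length + pvMu start0 graph v * ((pvAllRefs graph).length + 1) < g →
      pvLoopB graph g stack v = stack.foldl (fun acc x => pvDfsA graph f x acc) v := by
  intro g
  induction g with
  | zero => intro stack v _ _ hb; omega
  | succ g ih =>
    intro stack v hstack hf hb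
    match stack with
    | [] => rfl
    | x :: rest =>
      obtain ⟨f', rfl⟩ : ∃ f', f = f' + 1 := ⟨f - 1, by omega⟩
      rw [List.foldl_cons]
      by_cases hcon : PySem.Set.contains v x = true
      · rw [show pvLoopB graph (g+1) (x::rest) v = pvLoopB graph g rest v from by
          simp only [pvLoopB]; rw [if_pos hcon]]
        rw [show pvDfsA graph (f'+1) x v = v from by simp only [pvDfsA]; rw [if_pos hcon]]
        exact ih rest v (fun y hy => hstack y (by simp [hy])) hf (by simp at hb ⊢; omega)
      · have hcon' : PySem.Set.contains v x = false := by simpa using hcon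
        have hxU : x ∈ pvU start0 graph := hstack x (by simp)
        have hmu : pvMu start0 graph (v ++ [x]) < pvMu start0 graph v :=
          pvMu_lt start0 graph v x hxU hcon'
        have hcs : ∀ c ∈ pvRefs graph x, c ∈ pvU start0 graph :=
          fun c hc => List.mem_cons_of_mem _ ((pvRefs_sublist graph x).subset hc)
        rw [show pvLoopB graph (g+1) (x::rest) v
            = pvLoopB graph g (pvRefs graph x ++ rest) (v ++ [x]) from by
          simp only [pvLoopB]; rw [if_neg (by simpa [PySem.Set.contains, List.contains_eq_mem] using hcon'), pvAdd_eq v x hcon']]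
        rw [show pvDfsA graph (f'+1) x v
            = (pvRefs graph x).foldl (fun v r => pvDfsA graph f' r v) (v ++ [x]) from by
          simp only [pvDfsA]; rw [if_neg (by simpa [PySem.Set.contains, List.contains_eq_mem] using hcon'), pvAdd_eq v x hcon']]
        rw [pvFoldl_fuel start0 graph (pvRefs graph x) (v ++ [x]) f' (f' + 1) hcs
          (by omega) (by omega)]
        rw [← List.foldl_append]
        refine ih (pvRefs graph x ++ rest) (v ++ [x]) ?_ (by omega) ?_
        · intro y hy
          rcases List.mem_append.mp hy with h | h
          · exact hcs y h
          · exact hstack y (by simp [h])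
        · have hlen : (pvRefs graph x).length ≤ (pvAllRefs graph).length :=
            (pvRefs_sublist graph x).length_le
          simp only [List.length_append, List.length_cons] at hb ⊢
          nlinarith [hmu, hlen, hb]

-- ===== VERDICT (by name: the statement is the Claim_ definition above) =====
theorem traverse_from_document_spec : Claim_equal_traverse_from_document := by
  intro start graph visited _
  unfold Spec_traverse_from_document traverse_from_document traverse_from_document_alt
  rw [pvIter_eq_loop]
  have hU : (start :: pvAllRefs graph) = pvU start graph := rfl
  rw [hU]
  have hmu := pvMu_le start graph (visited.getD [])
  have hlenU : (pvU start graph).length = (pvAllRefs graph).length + 1 := by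
    simp [pvU]
  rw [pvBridge start graph ((pvU start graph).length + 1)
    (((pvU start graph).length + 1) * ((pvAllRefs graph).length + 1) + 1)
    [start] (visited.getD [])
    (fun x hx => by simpa using (by simpa using hx : x = start) ▸ List.mem_cons_self)
    (by omega)
    (by simp only [List.length_cons, List.length_nil]; nlinarith [hmu, hlenU])]
  simp only [List.foldl_cons, List.foldl_nil]
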